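-- pv_equiv track=rewrite | github.com/Nanazuzu/PythonLearn | 2025_06_03/2025_06_03(2).py | can_form_staircase
-- ===== SOURCE A (Python) =====
-- def can_form_staircase(nums: list[int]) -> bool:
--   num = sorted(nums)
--   ret = True
--   for index in range(0,len(num) - 1):
--     if 1 < abs(num[index] - num[index + 1]):
--       ret = False
--       break
--   return ret
-- ===== SOURCE B (Python) =====
-- def can_form_staircase(nums: list[int]) -> bool:
--   if not nums:
--     return True
--   return len(set(nums)) == max(nums) - min(nums) + 1
-- ===== Notes on version B (the rewrite author's own statement) =====
-- stated objective: faster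
-- what changed: Replaces sort-then-scan-adjacent-gaps with a closed-form contiguity check: the distinct values form a staircase iff their count equals max-min+1, so no sorting or pair loop at all.
import Mathlib
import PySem

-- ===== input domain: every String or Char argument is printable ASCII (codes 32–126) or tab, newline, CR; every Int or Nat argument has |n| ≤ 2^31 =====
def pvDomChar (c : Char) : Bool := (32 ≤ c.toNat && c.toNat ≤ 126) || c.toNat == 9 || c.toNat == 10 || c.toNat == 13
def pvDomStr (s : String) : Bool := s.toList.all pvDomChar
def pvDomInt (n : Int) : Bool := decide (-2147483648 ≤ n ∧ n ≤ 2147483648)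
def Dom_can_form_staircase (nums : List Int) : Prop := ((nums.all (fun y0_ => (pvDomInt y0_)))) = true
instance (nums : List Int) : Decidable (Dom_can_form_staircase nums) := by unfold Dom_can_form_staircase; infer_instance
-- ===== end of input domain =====

-- B replaces A's sort-then-scan-adjacent-gaps with a closed-form contiguity check
-- (count of distinct values = max - min + 1): simpler, no sorting, no pair loop.

-- ===== PORT A =====
-- the 'for index in range(0, len(num)-1): if 1 < abs(...): ret=False; break' loop:
-- recursion over the range list, 'break' = returning false immediately
def canFormStaircaseLoopA (num : List Int) : List Int → Bool
  | [] => true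
  | i :: rest =>
    if 1 < |PySem.List.pyGetD num i 0 - PySem.List.pyGetD num (i + 1) 0| then false
    else canFormStaircaseLoopA num rest

def can_form_staircase (nums : List Int) : Bool :=
  let num := PySem.List.sorted nums (fun x => x) false
  canFormStaircaseLoopA num (PySem.List.pyRange 0 ((num.length : Int) - 1) 1)

-- ===== PORT B =====
def can_form_staircase_alt (nums : List Int) : Bool :=
  if nums.isEmpty then true
  else ((PySem.Set.ofList nums).length : Int) ==
    (PySem.List.max? nums (fun x => x)).getD 0 - (PySem.List.min? nums (fun x => x)).getD 0 + 1

-- ===== PRECONDITION & SPEC =====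
def Spec_can_form_staircase (nums : List Int) (out : Bool) : Prop := out = can_form_staircase_alt nums
instance (nums : List Int) (out : Bool) : Decidable (Spec_can_form_staircase nums out) := by unfold Spec_can_form_staircase; infer_instance

-- ===== CLAIM (what is proved, stated in full; the proofs are below) =====
def Claim_equal_can_form_staircase : Prop := ∀ (nums : List Int), Dom_can_form_staircase nums → Spec_can_form_staircase nums (can_form_staircase nums)

-- ===== LEMMAS AND PROOFS =====

-- structural form of A's adjacent-gap scan
def chainAbs : List Int → Bool
  | a :: b :: t => if 1 < |a - b| then false else chainAbs (b :: t)
  | _ => true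

lemma chainAbs_short (l : List Int) (h : l.length ≤ 1) : chainAbs l = true := by
  match l, h with
  | [], _ => rfl
  | [_], _ => rfl

-- A's index loop over range(i, len-1) is the structural scan of (l.drop i)
lemma loopA_drop (l : List Int) :
    ∀ k i, l.length - i ≤ k →
      canFormStaircaseLoopA l (PySem.List.pyRange (i : Int) ((l.length : Int) - 1) 1)
        = chainAbs (l.drop i) := by
  intro k
  induction k with
  | zero =>
    intro i hi
    have hle : (l.length : Int) - 1 ≤ (i : Int) := by omega
    rw [PySem.List.pyRange_one_eq_nil hle, chainAbs_short _ (by simp; omega)]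
    rfl
  | succ k ih =>
    intro i hi
    by_cases hlt : i + 1 < l.length
    · have hcons : PySem.List.pyRange (i : Int) ((l.length : Int) - 1) 1
          = (i : Int) :: PySem.List.pyRange ((i : Int) + 1) ((l.length : Int) - 1) 1 :=
        PySem.List.pyRange_one_cons (by omega)
      have hi1 : i < l.length := by omega
      have hi2 : i + 1 < l.length := hlt
      have hgi : PySem.List.pyGetD l (i : Int) 0 = l[i] := by
        rw [PySem.List.pyGetD_natCast]; exact List.getD_eq_getElem l 0 hi1
      have hgi1 : PySem.List.pyGetD l ((i : Int) + 1) 0 = l[i + 1] := by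
        rw [show ((i : Int) + 1) = ((i + 1 : Nat) : Int) by push_cast; ring,
          PySem.List.pyGetD_natCast]
        exact List.getD_eq_getElem l 0 hi2
      have hdrop : l.drop i = l[i] :: l[i + 1] :: l.drop (i + 2) := by
        rw [List.drop_eq_getElem_cons hi1, List.drop_eq_getElem_cons hi2]
      rw [hcons]
      show (if 1 < |PySem.List.pyGetD l (i : Int) 0 - PySem.List.pyGetD l ((i : Int) + 1) 0|
            then false
            else canFormStaircaseLoopA l (PySem.List.pyRange ((i : Int) + 1) ((l.length : Int) - 1) 1))
          = chainAbs (l.drop i)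
      have hrec : canFormStaircaseLoopA l (PySem.List.pyRange ((i + 1 : Nat) : Int) ((l.length : Int) - 1) 1)
          = chainAbs (l.drop (i + 1)) := ih (i + 1) (by omega)
      rw [hgi, hgi1, hdrop]
      by_cases hgap : 1 < |l[i] - l[i + 1]|
      · simp [chainAbs, hgap]
      · simp only [chainAbs, hgap, if_false]
        have : l.drop (i + 1) = l[i + 1] :: l.drop (i + 2) := List.drop_eq_getElem_cons hi2
        rw [show ((i : Int) + 1) = ((i + 1 : Nat) : Int) by push_cast; ring, hrec, this]
    · have hle : (l.length : Int) - 1 ≤ (i : Int) := by omega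
      rw [PySem.List.pyRange_one_eq_nil hle, chainAbs_short _ (by simp; omega)]
      rfl

-- every element of a nondecreasing list is at most its last element
lemma pairwise_le_getLast (l : List Int) (hne : l ≠ []) (hp : l.Pairwise (· ≤ ·)) :
    ∀ y ∈ l, y ≤ l.getLast hne := by
  induction l with
  | nil => exact absurd rfl hne
  | cons a t ih =>
    intro y hy
    cases t with
    | nil =>
      rcases List.mem_singleton.mp hy with rfl
      simp
    | cons b t2 =>
      have hne2 : (b :: t2) ≠ [] := by simp
      have hp2 : (b :: t2).Pairwise (· ≤ ·) := (List.pairwise_cons.mp hp).2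
      have hlast : (a :: b :: t2).getLast hne = (b :: t2).getLast hne2 := by
        simp [List.getLast_cons]
      rw [hlast]
      rcases List.mem_cons.mp hy with rfl | hy2
      · exact le_trans ((List.pairwise_cons.mp hp).1 b (by simp))
          (ih hne2 hp2 b (by simp))
      · exact ih hne2 hp2 y hy2

-- on a nondecreasing list, the scan succeeds iff every value between head and last occurs
lemma chainAbs_iff_interval (l : List Int) (hne : l ≠ []) (hs : l.Pairwise (· ≤ ·)) :
    chainAbs l = true ↔ ∀ k, l.head hne ≤ k → k ≤ l.getLast hne → k ∈ l := by
  induction l with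
  | nil => exact absurd rfl hne
  | cons a t ih =>
    cases t with
    | nil =>
      simp only [chainAbs, List.head_cons, List.getLast_singleton]
      constructor
      · intro _ k h1 h2
        have : k = a := le_antisymm h2 h1
        simp [this]
      · intro _; trivial
    | cons b t2 =>
      have hab : a ≤ b := (List.pairwise_cons.mp hs).1 b (by simp)
      have hs2 : (b :: t2).Pairwise (· ≤ ·) := (List.pairwise_cons.mp hs).2
      have hbt : ∀ x ∈ t2, b ≤ x := (List.pairwise_cons.mp hs2).1
      have hne2 : (b :: t2) ≠ [] := by simp
      have hlast : (a :: b :: t2).getLast hne = (b :: t2).getLast hne2 := by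
        simp [List.getLast_cons]
      have hbz : b ≤ (b :: t2).getLast hne2 := by
        have hmem := List.getLast_mem hne2
        rcases List.mem_cons.mp hmem with h | h
        · exact le_of_eq h.symm
        · exact hbt _ h
      have habs : |a - b| = b - a := by
        rw [abs_sub_comm]; exact abs_of_nonneg (by omega)
      have hcond : (1 < |a - b|) ↔ a + 1 < b := by rw [habs]; omega
      constructor
      · intro hch k h1 h2
        simp only [chainAbs] at hch
        by_cases hgap : 1 < |a - b|
        · simp [hgap] at hch
        · have hb1 : b ≤ a + 1 := by rw [hcond] at hgap; omega
          have hch2 : chainAbs (b :: t2) = true := by simpa [hgap] using hch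
          simp only [List.head_cons] at h1
          rw [hlast] at h2
          by_cases hk : b ≤ k
          · exact List.mem_cons_of_mem a ((ih hne2 hs2).mp hch2 k hk h2)
          · have : k = a := by omega
            simp [this]
      · intro hmem
        simp only [chainAbs]
        have hz : a ≤ (b :: t2).getLast hne2 := le_trans hab hbz
        have hgap : ¬ (1 < |a - b|) := by
          rw [hcond]
          intro hlt
          have : a + 1 ∈ a :: b :: t2 := by
            apply hmem (a + 1) (by simp)
            rw [hlast]; omega
          rcases List.mem_cons.mp this with h | h
          · omega
          · rcases List.mem_cons.mp h with h' | h'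
            · omega
            · have := hbt _ h'; omega
        rw [if_neg hgap]
        apply (ih hne2 hs2).mpr
        intro k h1 h2
        simp only [List.head_cons] at h1
        have : k ∈ a :: b :: t2 := by
          apply hmem k (by simp; omega)
          rw [hlast]; exact h2
        rcases List.mem_cons.mp this with h | h
        · have : a = b := le_antisymm hab (by omega)
          simp [h, ← this]
        · exact h

-- ===== VERDICT (by name: the statement is the Claim_ definition above) =====
theorem can_form_staircase_spec : Claim_equal_can_form_staircase := by
  intro nums _
  unfold Spec_can_form_staircase
  rcases hnil : nums with _ | ⟨x, xs⟩
  · rfl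
  rw [← hnil]
  have hne : nums ≠ [] := by rw [hnil]; simp
  set S := PySem.List.sorted nums (fun x => x) false with hS
  have hSperm : S.Perm nums := PySem.List.sorted_perm nums (fun x => x) false
  have hSne : S ≠ [] := by
    rw [hS]; rw [Ne, PySem.List.sorted_eq_nil_iff]; exact hne
  have hSp : S.Pairwise (· ≤ ·) := by
    simpa using PySem.List.sorted_pairwise nums (fun x => x)
  have hmemS : ∀ y, y ∈ S ↔ y ∈ nums := fun y => hSperm.mem_iff
  set h := S.head hSne with hh
  set z := S.getLast hSne with hz
  -- h is the minimum of nums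
  have hhmem : h ∈ nums := (hmemS h).mp (List.head_mem hSne)
  have hhmin : ∀ y ∈ nums, h ≤ y := by
    obtain ⟨m, t, hmt⟩ := List.exists_cons_of_ne_nil hSne
    have := PySem.List.key_head_sorted_le (xs := nums) (key := fun x => x) (m := m) (t := t) (by rw [← hS, hmt])
    have hhm : h = m := by
      show S.head hSne = m
      simp only [hmt, List.head_cons]
    intro y hy; rw [hhm]; exact this y hy
  -- z is the maximum of nums
  have hzmem : z ∈ nums := (hmemS z).mp (List.getLast_mem hSne)
  have hzmax : ∀ y ∈ nums, y ≤ z := by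
    intro y hy
    exact pairwise_le_getLast S hSne hSp y ((hmemS y).mpr hy)
  have hhz : h ≤ z := hhmin z hzmem
  -- A's value is the structural scan of S
  have hA : can_form_staircase nums = chainAbs S := by
    show canFormStaircaseLoopA S (PySem.List.pyRange 0 ((S.length : Int) - 1) 1) = chainAbs S
    have := loopA_drop S S.length 0 (by omega)
    simpa using this
  -- B's min/max are h and z
  have hmn : PySem.List.min? nums (fun x => x) = some h := by
    rcases hm : PySem.List.min? nums (fun x => x) with _ | m
    · rw [PySem.List.min?_eq_none_iff] at hm; exact absurd hm hne
    · have hmmem : m ∈ nums := PySem.List.min?_mem hm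
      have hmle : ∀ y ∈ nums, m ≤ y := by
        intro y hy; exact PySem.List.min?_isMin hm y hy
      have : m = h := le_antisymm (hmle h hhmem) (hhmin m hmmem)
      rw [this]
  have hmx : PySem.List.max? nums (fun x => x) = some z := by
    rcases hm : PySem.List.max? nums (fun x => x) with _ | m
    · rw [PySem.List.max?_eq_none_iff] at hm; exact absurd hm hne
    · have hmmem : m ∈ nums := PySem.List.max?_mem hm
      have hmge : ∀ y ∈ nums, y ≤ m := by
        intro y hy; exact PySem.List.max?_isMax hm y hy
      have : m = z := le_antisymm (hzmax m hmmem) (hmge z hzmem)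
      rw [this]
  -- the distinct-value count is the card of the value set
  set c := (PySem.Set.ofList nums).length with hc
  have hcard : c = nums.toFinset.card := by
    have hnd : (PySem.Set.ofList nums).Nodup := PySem.Set.nodup_ofList nums
    have hts : (PySem.Set.ofList nums).toFinset = nums.toFinset := by
      apply Finset.ext
      intro y
      simp [List.mem_toFinset, PySem.Set.mem_ofList]
    rw [hc, ← List.toFinset_card_of_nodup hnd, hts]
  -- the value set is always inside [h, z]
  have hsub : nums.toFinset ⊆ Finset.Icc h z := by
    intro y hy
    rw [List.mem_toFinset] at hy
    rw [Finset.mem_Icc]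
    exact ⟨hhmin y hy, hzmax y hy⟩
  have hIccCard : (Finset.Icc h z).card = (z + 1 - h).toNat := Int.card_Icc h z
  -- B's value
  have hB : can_form_staircase_alt nums = ((c : Int) == z - h + 1) := by
    unfold can_form_staircase_alt
    rw [if_neg (by simp [List.isEmpty_iff]; exact hne), hmn, hmx]
    rfl
  rw [hA, hB]
  -- the interval characterisation of the scan
  have hiff : chainAbs S = true ↔ ∀ k, h ≤ k → k ≤ z → k ∈ nums := by
    rw [chainAbs_iff_interval S hSne hSp]
    constructor
    · intro hch k h1 h2; exact (hmemS k).mp (hch k h1 h2)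
    · intro hch k h1 h2; exact (hmemS k).mpr (hch k h1 h2)
  cases hch : chainAbs S with
  | true =>
    have hsup : Finset.Icc h z ⊆ nums.toFinset := by
      intro y hy
      rw [Finset.mem_Icc] at hy
      rw [List.mem_toFinset]
      exact (hiff.mp hch) y hy.1 hy.2
    have heq : nums.toFinset = Finset.Icc h z := Finset.Subset.antisymm hsub hsup
    have : c = (z + 1 - h).toNat := by rw [hcard, heq, hIccCard]
    symm
    rw [beq_iff_eq]
    omega
  | false =>
    have hmiss : ∃ k, h ≤ k ∧ k ≤ z ∧ k ∉ nums := by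
      by_contra hcon
      push Not at hcon
      have : chainAbs S = true := hiff.mpr (fun k h1 h2 => hcon k h1 h2)
      rw [hch] at this; exact absurd this (by simp)
    obtain ⟨k, hk1, hk2, hk3⟩ := hmiss
    have hss : nums.toFinset ⊂ Finset.Icc h z := by
      rw [Finset.ssubset_iff_of_subset hsub]
      exact ⟨k, by rw [Finset.mem_Icc]; exact ⟨hk1, hk2⟩, by rw [List.mem_toFinset]; exact hk3⟩
    have hlt : nums.toFinset.card < (Finset.Icc h z).card := Finset.card_lt_card hss
    rw [hIccCard] at hlt
    symm
    rw [beq_eq_false_iff_ne]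
    omega
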